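-- pv_equiv track=rewrite | github.com/ariuk44/retake_exam_prep | day_5.py | matches_pattern1
-- ===== SOURCE A (Python) =====
-- def matches_pattern1(arr, pattern):
--     i = 0
--     n = len(arr)
--     m = len(pattern)
--     for j in range(m):
--         matches_count = 0
--         for k in range(i, n):
--             if arr[k] == pattern[j]:
--                 matches_count += 1
--             else:
--                 break
--         if matches_count == 0:
--             return 0
--         i += matches_count
--     return 1 if n == i else 0
-- ===== SOURCE B (Python) =====
-- def matches_pattern1(arr, pattern):
--     # Build the run-length-encoding keys (adjacent dedup) in one pass,
--     # then compare the whole key sequence with the pattern.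
--     keys = []
--     prev = None
--     for x in arr:
--         if prev is None or x != prev:
--             keys.append(x)
--         prev = x
--     return int(keys == list(pattern))
-- ===== Notes on version B (the rewrite author's own statement) =====
-- stated objective: idiomatic
-- what changed: Replaces A's greedy two-pointer block-by-block scan with a single pass that collapses adjacent duplicates into the run-key sequence and one whole-list comparison against the pattern.
import Mathlib
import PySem

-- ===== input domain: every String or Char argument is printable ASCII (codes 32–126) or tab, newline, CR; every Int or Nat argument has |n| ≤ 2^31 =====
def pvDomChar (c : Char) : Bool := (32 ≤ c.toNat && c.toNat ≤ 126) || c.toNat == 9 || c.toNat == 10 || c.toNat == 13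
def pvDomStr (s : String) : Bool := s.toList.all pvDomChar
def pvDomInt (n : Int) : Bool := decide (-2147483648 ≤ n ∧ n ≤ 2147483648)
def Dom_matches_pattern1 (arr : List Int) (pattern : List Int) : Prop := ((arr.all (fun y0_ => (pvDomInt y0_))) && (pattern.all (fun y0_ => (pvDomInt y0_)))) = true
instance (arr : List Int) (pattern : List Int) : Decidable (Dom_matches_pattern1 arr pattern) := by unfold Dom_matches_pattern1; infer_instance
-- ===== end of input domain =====

-- B replaces A's greedy two-pointer block scan by one adjacent-dedup pass plus a whole-list
-- comparison with the pattern (idiomatic restructuring; same cost).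

-- ===== PORT A =====
-- inner 'for k in range(i, n): if arr[k] == pattern[j]: matches_count += 1 else: break'
-- (the 'none' branch mirrors Python's IndexError; it is unreachable since every k ∈ range(i, n)
-- with 0 ≤ i is a valid index)
def pvInnerA (arr : List Int) (ks : List Int) (v : Int) (acc : Int) : Int :=
  match ks with
  | [] => acc
  | k :: rest =>
    match PySem.List.pyGet? arr k with
    | none => acc
    | some a => if a = v then pvInnerA arr rest v (acc + 1) else acc

-- outer 'for j in range(m)' loop, carrying the pointer i
def pvOuterA (arr : List Int) (ps : List Int) (i : Int) : Int :=
  match ps with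
  | [] => if (arr.length : Int) = i then 1 else 0
  | v :: rest =>
    let c := pvInnerA arr (PySem.List.pyRange i (arr.length : Int) 1) v 0
    if c = 0 then 0 else pvOuterA arr rest (i + c)

def matches_pattern1 (arr : List Int) (pattern : List Int) : Int :=
  pvOuterA arr pattern 0

-- ===== PORT B =====
-- the loop body of Source B: keys/prev state, append x when it differs from the previous element
def pvStepB (st : List Int × Option Int) (x : Int) : List Int × Option Int :=
  (if st.2 = none ∨ st.2 ≠ some x then st.1 ++ [x] else st.1, some x)

def matches_pattern1_alt (arr : List Int) (pattern : List Int) : Int :=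
  let st := arr.foldl pvStepB ([], none)
  if st.1 = pattern then 1 else 0

-- ===== PRECONDITION & SPEC =====
def Spec_matches_pattern1 (arr : List Int) (pattern : List Int) (out : Int) : Prop := out = matches_pattern1_alt arr pattern
instance (arr : List Int) (pattern : List Int) (out : Int) : Decidable (Spec_matches_pattern1 arr pattern out) := by unfold Spec_matches_pattern1; infer_instance

-- ===== CLAIM (what is proved, stated in full; the proofs are below) =====
def Claim_equal_matches_pattern1 : Prop := ∀ (arr : List Int) (pattern : List Int), Dom_matches_pattern1 arr pattern → Spec_matches_pattern1 arr pattern (matches_pattern1 arr pattern)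

-- ===== LEMMAS AND PROOFS =====

-- adjacent dedup relative to a previous element: the key sequence both programs compute
def pvDedup : Option Int → List Int → List Int
  | _, [] => []
  | prev, x :: t => if prev = some x then pvDedup (some x) t else x :: pvDedup (some x) t

theorem pvFoldB_eq (xs : List Int) : ∀ (acc : List Int) (prev : Option Int),
    (xs.foldl pvStepB (acc, prev)).1 = acc ++ pvDedup prev xs := by
  induction xs with
  | nil => intro acc prev; simp [pvDedup]
  | cons x t ih =>
    intro acc prev
    simp only [List.foldl_cons, pvStepB]
    cases prev with
    | none => simp [pvDedup, ih]
    | some y =>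
      by_cases h : y = x
      · subst h; simp [pvDedup, ih]
      · simp [pvDedup, h, ih]

theorem pvDedup_some (a : Int) (t : List Int) :
    pvDedup (some a) t = pvDedup none (t.dropWhile (fun x => x == a)) := by
  induction t with
  | nil => simp [pvDedup]
  | cons b rest ih =>
    by_cases h : a = b
    · subst h; simpa [pvDedup, List.dropWhile] using ih
    · have hba : (b == a) = false := by simp [Ne.symm h]
      simp [pvDedup, h, List.dropWhile, hba]

theorem pvInnerA_eq (arr : List Int) : ∀ (k : ℕ) (i : ℕ), arr.length - i ≤ k → i ≤ arr.length →
    ∀ (v acc : Int),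
      pvInnerA arr (PySem.List.pyRange (i : Int) (arr.length : Int) 1) v acc
        = acc + (((arr.drop i).takeWhile (fun x => x == v)).length : Int) := by
  intro k
  induction k with
  | zero =>
    intro i hk hi v acc
    have hi' : i = arr.length := by omega
    subst hi'
    rw [PySem.List.pyRange_one_eq_nil (by omega)]
    simp [pvInnerA]
  | succ k ih =>
    intro i hk hi v acc
    by_cases hlt : i < arr.length
    · rw [PySem.List.pyRange_one_cons (by exact_mod_cast hlt)]
      have hget : PySem.List.pyGet? arr (i : Int) = some arr[i] := by
        rw [PySem.List.pyGet?_natCast]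
        exact List.getElem?_eq_getElem hlt
      have hdrop : arr.drop i = arr[i] :: arr.drop (i + 1) := List.drop_eq_getElem_cons hlt
      simp only [pvInnerA, hget]
      by_cases hv : arr[i] = v
      · rw [if_pos hv]
        have hcast : ((i : Int) + 1) = ((i + 1 : ℕ) : Int) := by push_cast; ring
        rw [hcast, ih (i + 1) (by omega) (by omega) v (acc + 1), hdrop,
          List.takeWhile_cons_of_pos (by simpa using hv)]
        simp only [List.length_cons]
        push_cast
        ring
      · rw [if_neg hv, hdrop, List.takeWhile_cons_of_neg (by simpa using hv)]
        simp
    · have hi' : i = arr.length := by omega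
      subst hi'
      rw [PySem.List.pyRange_one_eq_nil (by omega)]
      simp [pvInnerA]

theorem pvDedup_nil_iff (s : List Int) : pvDedup none s = [] ↔ s = [] := by
  cases s with
  | nil => simp [pvDedup]
  | cons a t => simp [pvDedup]

theorem pvDropWhile_eq_drop (p : Int → Bool) (l : List Int) :
    l.dropWhile p = l.drop (l.takeWhile p).length := by
  induction l with
  | nil => simp
  | cons a t ih =>
    by_cases h : p a
    · simp [List.dropWhile, List.takeWhile, h, ih]
    · simp [List.dropWhile, List.takeWhile, h]

theorem pvOuterA_eq (arr : List Int) : ∀ (ps : List Int) (i : ℕ), i ≤ arr.length →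
    pvOuterA arr ps (i : Int) = if pvDedup none (arr.drop i) = ps then 1 else 0 := by
  intro ps
  induction ps with
  | nil =>
    intro i hi
    rw [pvOuterA]
    by_cases h : i = arr.length
    · subst h; simp [List.drop_length, pvDedup]
    · have h1 : ¬ ((arr.length : Int) = (i : Int)) := by exact_mod_cast Ne.symm h
      have h2 : pvDedup none (arr.drop i) ≠ [] := by
        intro hnil
        have hd := (pvDedup_nil_iff _).mp hnil
        rw [List.drop_eq_nil_iff] at hd
        omega
      simp [h1, h2]
  | cons v rest ih =>
    intro i hi
    rw [pvOuterA]
    simp only [pvInnerA_eq arr (arr.length - i) i (by omega) hi v 0]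
    rcases Nat.eq_zero_or_pos ((arr.drop i).takeWhile (fun x => x == v)).length with hc0 | hcpos
    · rw [hc0]
      rw [if_pos (by norm_num)]
      have hne : pvDedup none (arr.drop i) ≠ v :: rest := by
        cases hs2 : arr.drop i with
        | nil => simp [pvDedup]
        | cons a t =>
          rw [hs2, List.takeWhile_cons] at hc0
          cases hav : (a == v) with
          | true => rw [hav] at hc0; simp at hc0
          | false =>
            have hne' : a ≠ v := by simpa using hav
            simp [pvDedup, hne']
      simp [hne]
    · have hcle : ((arr.drop i).takeWhile (fun x => x == v)).length ≤ (arr.drop i).length :=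
        (List.takeWhile_sublist _).length_le
      have hslen : (arr.drop i).length = arr.length - i := by simp
      rw [if_neg (by omega)]
      obtain ⟨a, t, hs2⟩ : ∃ a t, arr.drop i = a :: t := by
        cases h : arr.drop i with
        | nil => rw [h] at hcpos; simp at hcpos
        | cons a t => exact ⟨a, t, rfl⟩
      · have hav : a = v := by
          by_contra hne
          rw [hs2, List.takeWhile_cons_of_neg (by simpa using hne)] at hcpos
          simp at hcpos
        subst hav
        have hcast : (i : Int) + ((0 : Int) + (((arr.drop i).takeWhile (fun x => x == a)).length : Int))
            = ((i + ((arr.drop i).takeWhile (fun x => x == a)).length : ℕ) : Int) := by push_cast; ring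
        rw [hcast, ih _ (by omega)]
        have hdrop2 : arr.drop (i + ((arr.drop i).takeWhile (fun x => x == a)).length)
            = (arr.drop i).dropWhile (fun x => x == a) := by
          rw [pvDropWhile_eq_drop, List.drop_drop, Nat.add_comm]
        rw [hdrop2, hs2]
        have hkey : pvDedup none ((a :: t).dropWhile (fun x => x == a)) = pvDedup (some a) t := by
          rw [List.dropWhile_cons_of_pos (by simp)]
          exact (pvDedup_some a t).symm
        rw [hkey]
        have hd : pvDedup none (a :: t) = a :: pvDedup (some a) t := by simp [pvDedup]
        rw [hd]
        by_cases hr : pvDedup (some a) t = rest <;> simp [hr]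

-- ===== VERDICT (by name: the statement is the Claim_ definition above) =====
theorem matches_pattern1_spec : Claim_equal_matches_pattern1 := by
  intro arr pattern _
  unfold Spec_matches_pattern1 matches_pattern1 matches_pattern1_alt
  have hA := pvOuterA_eq arr pattern 0 (Nat.zero_le _)
  simp only [Nat.cast_zero, List.drop_zero] at hA
  have hB := pvFoldB_eq arr [] none
  simp only [List.nil_append] at hB
  rw [hA]
  show (if pvDedup none arr = pattern then 1 else 0)
      = if (arr.foldl pvStepB ([], none)).1 = pattern then 1 else 0
  rw [hB]
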